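-- pv_equiv track=rewrite | github.com/ArneBinder/pytorch-ie | src/pytorch_ie/utils/span.py | io_tags_to_spans
-- ===== SOURCE A (Python) =====
-- from typing import (
--     Callable,
--     Counter,
--     DefaultDict,
--     Dict,
--     List,
--     MutableSequence,
--     Optional,
--     Sequence,
--     Set,
--     Tuple,
-- )
--
-- TypedStringSpan = Tuple[str, Tuple[int, int]]
--
-- def io_tags_to_spans(
--     tag_sequence: List[str], classes_to_ignore: List[str] = None
-- ) -> List[TypedStringSpan]:
--     """
--     Decode spans from simple IO encoding tag sequence, i.e. tags with an expected tag set of labels + "O".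
--     Create spans from maximal subsequences that have the same label.
--
--     # Parameters
--     tag_sequence : `List[str]`, required.
--         The integer class labels for a sequence.
--     classes_to_ignore : `List[str]`, optional (default = `None`).
--         A list of string class labels `excluding` the bio tag
--         which should be ignored when extracting spans.
--     # Returns
--     spans : `List[TypedStringSpan]`
--         The typed, extracted spans from the sequence, in the format (label, (span_start, span_end)).
--         Note that the label `does not` contain any BIO tag prefixes.
--     """
--     classes_to_ignore = classes_to_ignore or []
--     spans: Set[Tuple[str, Tuple[int, int]]] = set()
--     span_start = 0
--     span_end = 0
--     active_tag = None
--     for index, string_tag in enumerate(tag_sequence):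
--         if string_tag == "O" or string_tag in classes_to_ignore:
--             # The span has ended.
--             if active_tag is not None:
--                 spans.add((active_tag, (span_start, span_end)))
--             active_tag = None
--             # We don't care about tags we are
--             # told to ignore, so we do nothing.
--             continue
--         elif string_tag == active_tag:
--             # We're inside a span.
--             span_end += 1
--         else:
--             if active_tag is not None:
--                 spans.add((active_tag, (span_start, span_end)))
--             active_tag = string_tag
--             span_start = index
--             span_end = index
--     # Last token might have been a part of a valid span.
--     if active_tag is not None:
--         spans.add((active_tag, (span_start, span_end)))
--     return list(spans)
-- ===== SOURCE B (Python) =====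
-- def io_tags_to_spans(tag_sequence, classes_to_ignore=None):
--     ignore = classes_to_ignore or []
--     n = len(tag_sequence)
--     # stateless boundary detection: a position is a span start / span end
--     # iff its tag is labeled and differs from its left / right neighbor
--     starts = [i for i, t in enumerate(tag_sequence)
--               if t != "O" and t not in ignore and (i == 0 or tag_sequence[i - 1] != t)]
--     ends = [i for i, t in enumerate(tag_sequence)
--             if t != "O" and t not in ignore and (i + 1 == n or tag_sequence[i + 1] != t)]
--     spans = set()
--     for i, j in zip(starts, ends):
--         spans.add((tag_sequence[i], (i, j)))
--     return list(spans)
-- ===== Notes on version B (the rewrite author's own statement) =====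
-- stated objective: alternative
-- what changed: Replaces A's stateful single-pass span tracker (active_tag/span_start/span_end) with stateless boundary detection: two index filters compute the span-start positions (labeled tag differing from its left neighbor) and span-end positions (labeled tag differing from its right neighbor), which are zipped into spans.
import Mathlib
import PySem

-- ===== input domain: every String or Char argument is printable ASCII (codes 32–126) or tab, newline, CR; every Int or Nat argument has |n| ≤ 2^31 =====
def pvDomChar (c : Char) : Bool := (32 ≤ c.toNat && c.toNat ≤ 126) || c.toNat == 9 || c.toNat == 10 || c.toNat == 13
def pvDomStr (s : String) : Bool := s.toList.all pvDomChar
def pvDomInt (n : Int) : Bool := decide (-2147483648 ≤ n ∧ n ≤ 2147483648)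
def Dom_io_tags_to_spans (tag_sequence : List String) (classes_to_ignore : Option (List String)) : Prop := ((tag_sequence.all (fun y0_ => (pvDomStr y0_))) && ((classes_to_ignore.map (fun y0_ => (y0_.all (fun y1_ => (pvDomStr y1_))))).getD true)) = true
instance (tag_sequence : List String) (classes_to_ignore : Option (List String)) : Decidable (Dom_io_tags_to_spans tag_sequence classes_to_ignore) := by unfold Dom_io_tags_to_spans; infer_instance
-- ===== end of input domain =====

-- B replaces A's stateful span tracker with stateless boundary detection: two index
-- filters (span starts, span ends) zipped into spans (objective: alternative algorithm, same cost).


-- ===== PORT A =====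
-- A's loop over enumerate(tag_sequence): state = (spans set, span_start, span_end, active_tag),
-- index carried explicitly. The returned list is A's spans set in insertion order (PySem.Set;
-- Python's list(set) hash iteration order is not modelled — outputs are compared as sets).
def ioLoopA (ign : List String) :
    List String → Int → PySem.Set (String × (Int × Int)) → Int → Int → Option String →
    PySem.Set (String × (Int × Int)) × Int × Int × Option String
  | [], _, spans, s, e, a => (spans, s, e, a)
  | tag :: rest, i, spans, s, e, a =>
    if tag = "O" ∨ tag ∈ ign then
      ioLoopA ign rest (i + 1)
        (match a with | some t => PySem.Set.add spans (t, (s, e)) | none => spans) s e none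
    else if some tag = a then
      ioLoopA ign rest (i + 1) spans s (e + 1) a
    else
      ioLoopA ign rest (i + 1)
        (match a with | some t => PySem.Set.add spans (t, (s, e)) | none => spans) i i (some tag)

def io_tags_to_spans (tag_sequence : List String) (classes_to_ignore : Option (List String)) : List (String × (Int × Int)) :=
  let ign := classes_to_ignore.getD []   -- `classes_to_ignore or []`
  match ioLoopA ign tag_sequence 0 PySem.Set.empty 0 0 none with
  | (spans, s, e, some t) => PySem.Set.add spans (t, (s, e))   -- trailing `if active_tag is not None`
  | (spans, _, _, none) => spans

-- ===== PORT B =====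
-- `i is a span start`: labeled tag differing from its left neighbor
def ioStartP (ign seq : List String) (i : Nat) : Bool :=
  decide (seq.getD i "" ≠ "O" ∧ seq.getD i "" ∉ ign ∧
    (i = 0 ∨ seq.getD (i - 1) "" ≠ seq.getD i ""))

-- `i is a span end`: labeled tag differing from its right neighbor
def ioEndP (ign seq : List String) (i : Nat) : Bool :=
  decide (seq.getD i "" ≠ "O" ∧ seq.getD i "" ∉ ign ∧
    (i + 1 = seq.length ∨ seq.getD (i + 1) "" ≠ seq.getD i ""))

def io_tags_to_spans_alt (tag_sequence : List String) (classes_to_ignore : Option (List String)) : List (String × (Int × Int)) :=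
  let ign := classes_to_ignore.getD []
  let starts := (List.range tag_sequence.length).filter (ioStartP ign tag_sequence)
  let ends := (List.range tag_sequence.length).filter (ioEndP ign tag_sequence)
  (starts.zip ends).foldl
    (fun spans ij => PySem.Set.add spans (tag_sequence.getD ij.1 "", ((ij.1 : Int), (ij.2 : Int))))
    PySem.Set.empty

-- ===== PRECONDITION & SPEC =====
def Spec_io_tags_to_spans (tag_sequence : List String) (classes_to_ignore : Option (List String)) (out : List (String × (Int × Int))) : Prop := out = io_tags_to_spans_alt tag_sequence classes_to_ignore
instance (tag_sequence : List String) (classes_to_ignore : Option (List String)) (out : List (String × (Int × Int))) : Decidable (Spec_io_tags_to_spans tag_sequence classes_to_ignore out) := by unfold Spec_io_tags_to_spans; infer_instance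

-- ===== CLAIM (what is proved, stated in full; the proofs are below) =====
def Claim_equal_io_tags_to_spans : Prop := ∀ (tag_sequence : List String) (classes_to_ignore : Option (List String)), Dom_io_tags_to_spans tag_sequence classes_to_ignore → Spec_io_tags_to_spans tag_sequence classes_to_ignore (io_tags_to_spans tag_sequence classes_to_ignore)

-- ===== LEMMAS AND PROOFS =====

-- intermediate description used only by the proofs: the maximal runs of equal tags
def ioRuns : List String → List (String × Nat)
  | [] => []
  | t :: rest =>
      (t, 1 + (rest.takeWhile (· == t)).length) :: ioRuns (rest.dropWhile (· == t))
  termination_by l => l.length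
  decreasing_by exact Nat.lt_succ_of_le (List.length_dropWhile_le _ _)

def ioEmitB (ign : List String) :
    List (String × Nat) → Int → PySem.Set (String × (Int × Int)) → PySem.Set (String × (Int × Int))
  | [], _, spans => spans
  | (t, k) :: rs, start, spans =>
      ioEmitB ign rs (start + (k : Int))
        (if t ≠ "O" ∧ t ∉ ign then PySem.Set.add spans (t, (start, start + (k : Int) - 1)) else spans)

theorem ioRuns_nil : ioRuns [] = [] := by rw [ioRuns.eq_def]

theorem ioRuns_cons (t : String) (rest : List String) :
    ioRuns (t :: rest)
      = (t, 1 + (rest.takeWhile (· == t)).length) :: ioRuns (rest.dropWhile (· == t)) := by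
  conv_lhs => rw [ioRuns.eq_def]

-- finalize A's loop state (the trailing add)
def ioFin (st : PySem.Set (String × (Int × Int)) × Int × Int × Option String) :
    PySem.Set (String × (Int × Int)) :=
  match st with
  | (spans, s, e, some t) => PySem.Set.add spans (t, (s, e))
  | (spans, _, _, none) => spans

-- inside a run of the active tag, A only bumps span_end and the index
theorem ioLoopA_run (ign : List String) (t : String) (ht : ¬ (t = "O" ∨ t ∈ ign)) :
    ∀ (l rest : List String), (∀ x ∈ l, x = t) → ∀ (i : Int) spans (s e : Int),
      ioLoopA ign (l ++ rest) i spans s e (some t)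
        = ioLoopA ign rest (i + l.length) spans s (e + l.length) (some t) := by
  intro l
  induction l with
  | nil => intro rest _ i spans s e; simp [ioLoopA]
  | cons h tl ih =>
      intro rest hmem i spans s e
      have hh : h = t := hmem h (by simp)
      subst hh
      simp only [List.cons_append, ioLoopA, if_neg ht, if_pos rfl]
      rw [ih rest (fun x hx => hmem x (by simp [hx])) (i + 1) spans s (e + 1)]
      have e1 : i + 1 + (tl.length : Int) = i + (((h :: tl).length : Nat) : Int) := by
        simp [List.length_cons]; push_cast; ring
      have e2 : e + 1 + (tl.length : Int) = e + (((h :: tl).length : Nat) : Int) := by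
        simp [List.length_cons]; push_cast; ring
      rw [e1, e2]
      simp

-- a run of an "O"/ignored tag is skipped with the rest of the state unchanged
theorem ioLoopA_skip (ign : List String) :
    ∀ (l rest : List String), (∀ x ∈ l, x = "O" ∨ x ∈ ign) → ∀ (i : Int) spans (s e : Int),
      ioLoopA ign (l ++ rest) i spans s e none
        = ioLoopA ign rest (i + l.length) spans s e none := by
  intro l
  induction l with
  | nil => intro rest _ i spans s e; simp [ioLoopA]
  | cons h tl ih =>
      intro rest hmem i spans s e
      simp only [List.cons_append, ioLoopA, if_pos (hmem h (by simp))]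
      rw [ih rest (fun x hx => hmem x (by simp [hx])) (i + 1) spans s e]
      have e1 : i + 1 + (tl.length : Int) = i + (((h :: tl).length : Nat) : Int) := by
        simp [List.length_cons]; push_cast; ring
      rw [e1]

-- at a run boundary, emitting the active span now or having emitted it already is the same
theorem ioLoopA_emit (ign : List String) (t : String) :
    ∀ (l : List String), l.head? ≠ some t → ∀ (i : Int) spans (s e : Int),
      ioFin (ioLoopA ign l i spans s e (some t))
        = ioFin (ioLoopA ign l i (PySem.Set.add spans (t, (s, e))) s e none) := by
  intro l hl i spans s e
  cases l with
  | nil => simp [ioLoopA, ioFin]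
  | cons h rest =>
      have hht : ¬ (some h = some t) := by simpa using hl
      by_cases hO : h = "O" ∨ h ∈ ign
      · simp [ioLoopA, if_pos hO]
      · simp [ioLoopA, if_neg hO, hht]

-- the head of dropWhile (· == t) is never t
theorem head_dropWhile_ne (t : String) (l : List String) :
    (l.dropWhile (· == t)).head? ≠ some t := by
  induction l with
  | nil => simp
  | cons h tl ih =>
      by_cases hh : (h == t)
      · simpa [List.dropWhile_cons, hh] using ih
      · simp only [List.dropWhile_cons, hh, Bool.false_eq_true, if_false, List.head?_cons,
          ne_eq, Option.some.injEq]
        intro hc; subst hc; simp at hh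

-- main invariant for the A side: A's loop from a fresh state computes run emission
theorem ioLoopA_eq_emitB (ign : List String) :
    ∀ (n : Nat) (l : List String), l.length ≤ n → ∀ (i : Int) spans (s e : Int),
      ioFin (ioLoopA ign l i spans s e none) = ioEmitB ign (ioRuns l) i spans := by
  intro n
  induction n with
  | zero =>
      intro l hl i spans s e
      have : l = [] := List.eq_nil_of_length_eq_zero (Nat.le_zero.mp hl)
      subst this; simp [ioLoopA, ioRuns_nil, ioEmitB, ioFin]
  | succ n ih =>
      intro l hl i spans s e
      cases l with
      | nil => simp [ioLoopA, ioRuns_nil, ioEmitB, ioFin]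
      | cons t rest =>
        have hsplit : rest.takeWhile (· == t) ++ rest.dropWhile (· == t) = rest :=
          List.takeWhile_append_dropWhile
        have hmem : ∀ x ∈ rest.takeWhile (· == t), x = t := by
          intro x hx
          have := List.mem_takeWhile_imp hx
          simpa using this
        have hlen : (rest.dropWhile (· == t)).length ≤ n := by
          have h1 := List.length_dropWhile_le (· == t) rest
          have h2 : rest.length ≤ n := by simpa using Nat.le_of_succ_le_succ hl
          omega
        have hki : i + 1 + ((rest.takeWhile (· == t)).length : Int)
            = i + ((1 + (rest.takeWhile (· == t)).length : Nat) : Int) := by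
          push_cast; ring
        rw [ioRuns_cons]
        by_cases hO : t = "O" ∨ t ∈ ign
        · have hnot : ¬ (t ≠ "O" ∧ t ∉ ign) := by tauto
          have hA := ioLoopA_skip ign (rest.takeWhile (· == t)) (rest.dropWhile (· == t))
              (fun x hx => by rw [hmem x hx]; exact hO) (i + 1) spans s e
          rw [hsplit] at hA
          simp only [ioLoopA, if_pos hO, ioEmitB, if_neg hnot]
          rw [hA, ih _ hlen, hki]
        · have hyes : t ≠ "O" ∧ t ∉ ign := by tauto
          have hnone : ¬ (some t = (none : Option String)) := by simp
          have hR := ioLoopA_run ign t hO (rest.takeWhile (· == t)) (rest.dropWhile (· == t))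
              hmem (i + 1) spans i i
          rw [hsplit] at hR
          simp only [ioLoopA, if_neg hO, if_neg hnone, ioEmitB, if_pos hyes]
          rw [hR, ioLoopA_emit ign t _ (head_dropWhile_ne t rest), ih _ hlen, hki]
          have he : i + ((rest.takeWhile (· == t)).length : Int)
              = i + ((1 + (rest.takeWhile (· == t)).length : Nat) : Int) - 1 := by
            push_cast; ring
          rw [he]

-- ---- B side: the zipped boundary filters compute the same run emission ----

-- length of takeWhile is bounded by the list length
theorem io_tw_le (p : String → Bool) (l : List String) : (l.takeWhile p).length ≤ l.length :=
  (List.takeWhile_prefix p).length_le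

-- dropWhile is drop past the takeWhile prefix
theorem io_dw_eq_drop (p : String → Bool) (l : List String) :
    l.dropWhile p = l.drop (l.takeWhile p).length := by
  induction l with
  | nil => simp
  | cons h tl ih =>
      by_cases hp : p h
      · simp [List.takeWhile_cons, List.dropWhile_cons, hp, ih]
      · simp [List.takeWhile_cons, List.dropWhile_cons, hp]

-- every position of the run starting at off carries the run's tag
theorem io_run_getD (seq : List String) (off k : Nat) (hoff : off < seq.length)
    (hk : k = 1 + ((seq.drop (off + 1)).takeWhile (· == seq.getD off "")).length) :
    ∀ j, j < k → seq.getD (off + j) "" = seq.getD off "" := by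
  intro j hj
  cases j with
  | zero => rfl
  | succ m =>
      have hm : m < ((seq.drop (off + 1)).takeWhile (· == seq.getD off "")).length := by omega
      have hpre := List.takeWhile_prefix (l := seq.drop (off + 1)) (· == seq.getD off "")
      have hmr : m < (seq.drop (off + 1)).length := lt_of_lt_of_le hm hpre.length_le
      have hlt : off + 1 + m < seq.length := by
        have hl : (seq.drop (off + 1)).length = seq.length - (off + 1) := List.length_drop
        omega
      have hidx : off + (m + 1) = off + 1 + m := by omega
      have h2 := List.mem_takeWhile_imp (List.getElem_mem hm)
      have h3 : ((seq.drop (off + 1)).takeWhile (· == seq.getD off ""))[m] = seq.getD off "" :=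
        eq_of_beq h2
      have h4 : (seq.drop (off + 1))[m]'hmr = seq.getD off "" :=
        (hpre.getElem hm).symm.trans h3
      rw [hidx, List.getD_eq_getElem?_getD, ← List.getElem?_drop,
        List.getElem?_eq_getElem hmr]
      simpa using h4

-- the run occupies [off, off+k) within the sequence
theorem io_run_le (seq : List String) (off k : Nat) (hoff : off < seq.length)
    (hk : k = 1 + ((seq.drop (off + 1)).takeWhile (· == seq.getD off "")).length) :
    off + k ≤ seq.length := by
  have h1 := io_tw_le (· == seq.getD off "") (seq.drop (off + 1))
  have h2 : (seq.drop (off + 1)).length = seq.length - (off + 1) := List.length_drop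
  omega

-- what follows the run is the dropWhile tail
theorem io_run_drop (seq : List String) (off k : Nat)
    (hk : k = 1 + ((seq.drop (off + 1)).takeWhile (· == seq.getD off "")).length) :
    seq.drop (off + k) = (seq.drop (off + 1)).dropWhile (· == seq.getD off "") := by
  rw [io_dw_eq_drop, List.drop_drop]
  congr 1
  omega

-- maximality: the run ends at the sequence end or before a different tag
theorem io_run_max (seq : List String) (off k : Nat) (hoff : off < seq.length)
    (hk : k = 1 + ((seq.drop (off + 1)).takeWhile (· == seq.getD off "")).length) :
    off + k = seq.length ∨ seq.getD (off + k) "" ≠ seq.getD off "" := by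
  by_cases hend : off + k < seq.length
  · right
    have hio := head_dropWhile_ne (seq.getD off "") (seq.drop (off + 1))
    rw [← io_run_drop seq off k hk] at hio
    have hh : (seq.drop (off + k)).head? = some (seq[off + k]'hend) := by
      rw [List.drop_eq_getElem_cons hend]; rfl
    intro hc
    apply hio
    rw [hh, ← List.getD_eq_getElem seq "" hend, hc]
  · left
    have := io_run_le seq off k hoff hk
    omega

-- the start filter over a run's index range is the run's start (if its tag is labeled)
theorem io_filter_starts (ign seq : List String) (off k : Nat) (hoff : off < seq.length)
    (hk : k = 1 + ((seq.drop (off + 1)).takeWhile (· == seq.getD off "")).length)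
    (hb : off = 0 ∨ seq.getD (off - 1) "" ≠ seq.getD off "") :
    (List.range' off k).filter (ioStartP ign seq)
      = if seq.getD off "" ≠ "O" ∧ seq.getD off "" ∉ ign then [off] else [] := by
  have hk1 : k = (k - 1) + 1 := by omega
  rw [hk1, List.range'_succ, List.filter_cons]
  have hrest : (List.range' (off + 1) (k - 1) 1).filter (ioStartP ign seq) = [] := by
    rw [List.filter_eq_nil_iff]
    intro j hj
    rw [List.mem_range'_1] at hj
    have hj1 : seq.getD j "" = seq.getD off "" := by
      have h := io_run_getD seq off k hoff hk (j - off) (by omega)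
      rwa [show off + (j - off) = j from by omega] at h
    have hj2 : seq.getD (j - 1) "" = seq.getD off "" := by
      have h := io_run_getD seq off k hoff hk (j - 1 - off) (by omega)
      rwa [show off + (j - 1 - off) = j - 1 from by omega] at h
    simp only [ioStartP, decide_eq_true_eq]
    rintro ⟨-, -, h3 | h3⟩
    · omega
    · exact h3 (hj2.trans hj1.symm)
  rw [hrest]
  by_cases hv : seq.getD off "" ≠ "O" ∧ seq.getD off "" ∉ ign
  · have hs : ioStartP ign seq off = true := by
      simp only [ioStartP, decide_eq_true_eq]
      exact ⟨hv.1, hv.2, hb⟩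
    rw [if_pos hs, if_pos hv]
  · have hs : ioStartP ign seq off = false := by
      simp only [ioStartP, decide_eq_false_iff_not]
      intro hc
      exact hv ⟨hc.1, hc.2.1⟩
    rw [if_neg (by simp [hs]), if_neg hv]

-- the end filter over a run's index range is the run's last index (if its tag is labeled)
theorem io_filter_ends (ign seq : List String) (off k : Nat) (hoff : off < seq.length)
    (hk : k = 1 + ((seq.drop (off + 1)).takeWhile (· == seq.getD off "")).length) :
    (List.range' off k).filter (ioEndP ign seq)
      = if seq.getD off "" ≠ "O" ∧ seq.getD off "" ∉ ign then [off + k - 1] else [] := by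
  have hle := io_run_le seq off k hoff hk
  have hk1 : k = (k - 1) + 1 := by omega
  rw [hk1, List.range'_concat, List.filter_append]
  have hfirst : (List.range' off (k - 1) 1).filter (ioEndP ign seq) = [] := by
    rw [List.filter_eq_nil_iff]
    intro j hj
    rw [List.mem_range'_1] at hj
    have hj1 : seq.getD j "" = seq.getD off "" := by
      have h := io_run_getD seq off k hoff hk (j - off) (by omega)
      rwa [show off + (j - off) = j from by omega] at h
    have hj2 : seq.getD (j + 1) "" = seq.getD off "" := by
      have h := io_run_getD seq off k hoff hk (j + 1 - off) (by omega)
      rwa [show off + (j + 1 - off) = j + 1 from by omega] at h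
    simp only [ioEndP, decide_eq_true_eq]
    rintro ⟨-, -, h3 | h3⟩
    · omega
    · exact h3 (hj2.trans hj1.symm)
  rw [hfirst]
  have hlast : off + 1 * (k - 1) = off + k - 1 := by omega
  rw [hlast]
  have hgl : seq.getD (off + k - 1) "" = seq.getD off "" := by
    have h := io_run_getD seq off k hoff hk (k - 1) (by omega)
    rwa [show off + (k - 1) = off + k - 1 from by omega] at h
  by_cases hv : seq.getD off "" ≠ "O" ∧ seq.getD off "" ∉ ign
  · have hs : ioEndP ign seq (off + k - 1) = true := by
      simp only [ioEndP, decide_eq_true_eq]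
      refine ⟨by rw [hgl]; exact hv.1, by rw [hgl]; exact hv.2, ?_⟩
      have hmax := io_run_max seq off k hoff hk
      rcases hmax with h | h
      · left; omega
      · right; rw [show off + k - 1 + 1 = off + k from by omega, hgl]; exact h
    rw [List.nil_append, List.filter_cons, if_pos hs, List.filter_nil, if_pos hv,
      show off + (k - 1 + 1) - 1 = off + k - 1 from by omega]
  · have hs : ioEndP ign seq (off + k - 1) = false := by
      simp only [ioEndP, decide_eq_false_iff_not]
      intro hc
      rw [hgl] at hc
      exact hv ⟨hc.1, hc.2.1⟩
    rw [List.nil_append, List.filter_cons, if_neg (by simp [hs]), List.filter_nil, if_neg hv]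

-- main invariant for the B side: run emission equals the fold over the zipped filters
theorem ioEmit_eq_zipfold (ign seq : List String) :
    ∀ (m off : Nat) (spans : PySem.Set (String × (Int × Int))),
      seq.length - off ≤ m →
      (seq.length ≤ off ∨ off = 0 ∨ seq.getD (off - 1) "" ≠ seq.getD off "") →
      ioEmitB ign (ioRuns (seq.drop off)) (off : Int) spans
        = (((List.range' off (seq.length - off)).filter (ioStartP ign seq)).zip
            ((List.range' off (seq.length - off)).filter (ioEndP ign seq))).foldl
            (fun sp ij => PySem.Set.add sp (seq.getD ij.1 "", ((ij.1 : Int), (ij.2 : Int)))) spans := by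
  intro m
  induction m with
  | zero =>
      intro off spans hm _
      have hoffn : seq.length ≤ off := by omega
      rw [List.drop_eq_nil_of_le hoffn, ioRuns_nil, Nat.sub_eq_zero_of_le hoffn]
      simp [ioEmitB]
  | succ m ih =>
      intro off spans hm hb
      by_cases hoff : off < seq.length
      · set k := 1 + ((seq.drop (off + 1)).takeWhile (· == seq.getD off "")).length with hk
        have hkk : k = 1 + ((seq.drop (off + 1)).takeWhile (· == seq.getD off "")).length := hk
        have hle := io_run_le seq off k hoff hkk
        have hdrop : seq.drop off = seq.getD off "" :: seq.drop (off + 1) := by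
          rw [List.drop_eq_getElem_cons hoff, List.getD_eq_getElem seq "" hoff]
        have hruns : ioRuns (seq.drop off)
            = (seq.getD off "", k) :: ioRuns (seq.drop (off + k)) := by
          rw [hdrop, ioRuns_cons, io_run_drop seq off k hkk]
        have hsum : k + (seq.length - off - k) = seq.length - off := by omega
        have hrange : List.range' off (seq.length - off)
            = List.range' off k ++ List.range' (off + k) (seq.length - off - k) := by
          have h := List.range'_append (s := off) (m := k) (n := seq.length - off - k) (step := 1)
          rw [hsum] at h
          rw [← h]
          norm_num
        have hbnd : off = 0 ∨ seq.getD (off - 1) "" ≠ seq.getD off "" := by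
          rcases hb with h | h
          · omega
          · exact h
        have hfs := io_filter_starts ign seq off k hoff hkk hbnd
        have hfe := io_filter_ends ign seq off k hoff hkk
        have hb' : seq.length ≤ off + k ∨ off + k = 0 ∨
            seq.getD (off + k - 1) "" ≠ seq.getD (off + k) "" := by
          rcases io_run_max seq off k hoff hkk with h | h
          · left; omega
          · right; right
            have hgl : seq.getD (off + k - 1) "" = seq.getD off "" := by
              have hg := io_run_getD seq off k hoff hkk (k - 1) (by omega)
              rwa [show off + (k - 1) = off + k - 1 from by omega] at hg
            rw [hgl]
            exact fun hc => h hc.symm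
        have hih := fun sp => ih (off + k) sp (by omega) hb'
        have hcast : (off : Int) + (k : Int) = ((off + k : Nat) : Int) := by push_cast; ring
        rw [hruns, hrange, List.filter_append, List.filter_append, hfs, hfe]
        by_cases hv : seq.getD off "" ≠ "O" ∧ seq.getD off "" ∉ ign
        · simp only [if_pos hv]
          rw [List.zip_append (by simp)]
          simp only [List.zip_cons_cons, List.zip_nil_right, List.foldl_append, List.foldl_cons,
            List.foldl_nil]
          show ioEmitB ign ((seq.getD off "", k) :: ioRuns (seq.drop (off + k))) (off : Int) spans = _
          simp only [ioEmitB, if_pos hv]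
          rw [hcast, hih _]
          rw [show ((off + k : Nat) : Int) - 1 = ((off + k - 1 : Nat) : Int) from by omega,
            show seq.length - off - k = seq.length - (off + k) from by omega]
        · simp only [if_neg hv]
          rw [List.zip_append (by simp)]
          simp only [List.zip_nil_right, List.foldl_append, List.foldl_nil]
          show ioEmitB ign ((seq.getD off "", k) :: ioRuns (seq.drop (off + k))) (off : Int) spans = _
          simp only [ioEmitB, if_neg hv]
          rw [hcast, show seq.length - off - k = seq.length - (off + k) from by omega]
          exact hih spans
      · have hoffn : seq.length ≤ off := by omega
        rw [List.drop_eq_nil_of_le hoffn, ioRuns_nil, Nat.sub_eq_zero_of_le hoffn]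
        simp [ioEmitB]

-- ===== VERDICT (by name: the statement is the Claim_ definition above) =====
theorem io_tags_to_spans_spec : Claim_equal_io_tags_to_spans := by
  intro tag_sequence classes_to_ignore _
  unfold Spec_io_tags_to_spans io_tags_to_spans io_tags_to_spans_alt
  have hA := ioLoopA_eq_emitB (classes_to_ignore.getD []) tag_sequence.length tag_sequence
    (le_refl _) 0 PySem.Set.empty 0 0
  unfold ioFin at hA
  have hB := ioEmit_eq_zipfold (classes_to_ignore.getD []) tag_sequence
    tag_sequence.length 0 PySem.Set.empty (by omega) (by right; left; rfl)
  simp only [List.drop_zero, Nat.sub_zero, Nat.cast_zero] at hB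
  rw [List.range_eq_range']
  exact hA.trans hB
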